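-- pv_equiv track=rewrite | github.com/PerryXDeng/wheatyeeters | hypotheses_modeling/pytorch_shit.py | get_argmax
-- ===== SOURCE A (Python) =====
-- def get_argmax(array):
--     max = 0
--     index = 0
--     for i in range(len(array)):
--         if array[i] > max:
--             max = array[i]
--             index = i
--
--     one_hot = [0, 0, 0, 0]
--     one_hot[index] = 1
--     return one_hot
-- ===== SOURCE B (Python) =====
-- def get_argmax(array):
--     m = max(array, default=0)
--     index = array.index(m) if m > 0 else 0
--     one_hot = [0, 0, 0, 0]
--     one_hot[index] = 1
--     return one_hot
-- ===== Notes on version B (the rewrite author's own statement) =====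
-- stated objective: idiomatic
-- what changed: replaces the fused running-max/index loop with the builtins max(array, default=0) and array.index(m), splitting the work into a max pass and a locate pass
import Mathlib
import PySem

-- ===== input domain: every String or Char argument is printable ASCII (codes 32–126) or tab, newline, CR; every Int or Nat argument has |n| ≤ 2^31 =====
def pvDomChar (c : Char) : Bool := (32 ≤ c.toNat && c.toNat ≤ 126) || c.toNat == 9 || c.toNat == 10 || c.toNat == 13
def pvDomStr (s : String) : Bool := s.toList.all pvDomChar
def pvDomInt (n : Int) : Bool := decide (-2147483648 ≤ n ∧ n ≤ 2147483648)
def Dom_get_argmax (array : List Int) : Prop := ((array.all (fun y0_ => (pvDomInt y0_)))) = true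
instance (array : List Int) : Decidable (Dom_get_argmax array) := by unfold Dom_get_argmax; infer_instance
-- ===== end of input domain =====

-- B replaces A's fused running-max/index loop with a max pass (default 0 floor via the guard) and a first-occurrence locate step; same return value on Pre_.


-- ===== PORT A =====
def get_argmax (array : List Int) : List Int :=
  let st := (PySem.List.pyRange 0 (array.length : Int) 1).foldl
    (fun (p : Int × Int) i =>
      if PySem.List.pyGetD array i 0 > p.1 then (PySem.List.pyGetD array i 0, i) else p)
    (0, 0)
  PySem.List.pySetD [0, 0, 0, 0] st.2 1

-- ===== PORT B =====
def get_argmax_alt (array : List Int) : List Int :=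
  let m : Int := (PySem.List.max? array (fun y => y)).getD 0
  let index : Int := if m > 0 then (((PySem.List.index? array m).getD 0 : Nat) : Int) else 0
  PySem.List.pySetD [0, 0, 0, 0] index 1

-- ===== PRECONDITION & SPEC =====
-- Pre_ excludes exactly the inputs where Python's one_hot[index] = 1 raises IndexError
-- (the first occurrence of a positive maximum lies at position ≥ 4); B raises the same IndexError there.
def Pre_get_argmax (array : List Int) : Prop :=
  (∀ y ∈ array, y ≤ 0) ∨ (∃ x ∈ array.take 4, ∀ y ∈ array, y ≤ x)
instance (array : List Int) : Decidable (Pre_get_argmax array) := by unfold Pre_get_argmax; infer_instance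
def pvWitness_get_argmax : List Int := ([5, 1, 3])

def Spec_get_argmax (array : List Int) (out : List Int) : Prop := out = get_argmax_alt array
instance (array : List Int) (out : List Int) : Decidable (Spec_get_argmax array out) := by unfold Spec_get_argmax; infer_instance

-- ===== CLAIM (what is proved, stated in full; the proofs are below) =====
def Claim_equal_get_argmax : Prop := ∀ (array : List Int), Dom_get_argmax array → Pre_get_argmax array → Spec_get_argmax array (get_argmax array)

-- ===== LEMMAS AND PROOFS =====

-- foldl max commutes with an extra max in the accumulator
theorem foldl_max_split (l : List Int) (a b : Int) :
    l.foldl max (max a b) = max a (l.foldl max b) := by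
  induction l generalizing b with
  | nil => rfl
  | cons x t ih => simpa [max_assoc] using ih (max b x)

-- first-occurrence index through a cons cell, total getD form
theorem index_getD_cons_of_ne (x v : Int) (t : List Int) (hne : x ≠ v) (hv : v ∈ t) :
    ((PySem.List.index? (x :: t) v).getD 0 : Nat) = (PySem.List.index? t v).getD 0 + 1 := by
  rw [PySem.List.index?_cons_of_ne _ hne]
  rcases h : PySem.List.index? t v with _ | k
  · exact absurd ((PySem.List.index?_eq_none_iff t v).mp h) (by simpa using hv)
  · simp

-- A's loop over enumerate computes (running max, index of its first strict improvement)
theorem loop_spec (xs : List Int) (s m idx : Int) :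
    (PySem.List.enumerate xs s).foldl
      (fun (p : Int × Int) e => if e.2 > p.1 then (e.2, e.1) else p) (m, idx)
    = (xs.foldl max m,
       if xs.foldl max m > m
       then s + (((PySem.List.index? xs (xs.foldl max m)).getD 0 : Nat) : Int)
       else idx) := by
  induction xs generalizing s m idx with
  | nil => simp [PySem.List.enumerate_nil]
  | cons x t ih =>
    rw [PySem.List.enumerate_cons]
    simp only [List.foldl_cons]
    by_cases hx : x > m
    · rw [if_pos hx, ih (s + 1) x s]
      have hxf : x ≤ t.foldl max x := (PySem.List.le_foldl_max t x).1
      rw [max_eq_right (le_of_lt hx)]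
      by_cases hgt : t.foldl max x > x
      · have hne : x ≠ t.foldl max x := ne_of_lt hgt
        have hmem : t.foldl max x ∈ t := by
          rcases PySem.List.foldl_max_mem t x with h | h
          · exact absurd h.symm hne
          · exact h
        have hcond : t.foldl max x > m := lt_trans hx hgt
        rw [if_pos hgt, if_pos hcond, index_getD_cons_of_ne x _ t hne hmem]
        refine congrArg _ ?_
        push_cast
        ring
      · have heq : t.foldl max x = x := le_antisymm (not_lt.mp hgt) hxf
        rw [heq, if_neg (lt_irrefl x), if_pos hx, PySem.List.index?_cons_self]
        simp
    · rw [if_neg hx, ih (s + 1) m idx]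
      rw [max_eq_left (not_lt.mp hx)]
      by_cases hgt : t.foldl max m > m
      · have hne : x ≠ t.foldl max m := ne_of_lt (lt_of_le_of_lt (not_lt.mp hx) hgt)
        have hmem : t.foldl max m ∈ t := by
          rcases PySem.List.foldl_max_mem t m with h | h
          · exact absurd h (ne_of_gt hgt)
          · exact h
        rw [if_pos hgt, if_pos hgt, index_getD_cons_of_ne x _ t hne hmem]
        refine congrArg _ ?_
        push_cast
        ring
      · rw [if_neg hgt, if_neg hgt]

-- the two computed indices coincide on every input
theorem index_agree (array : List Int) :
    (if array.foldl max 0 > 0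
     then (((PySem.List.index? array (array.foldl max 0)).getD 0 : Nat) : Int)
     else 0)
    = (if ((PySem.List.max? array (fun y => y)).getD 0) > 0
       then (((PySem.List.index? array ((PySem.List.max? array (fun y => y)).getD 0)).getD 0 : Nat) : Int)
       else 0) := by
  cases array with
  | nil => simp
  | cons x t =>
    rw [PySem.List.max?_id_cons]
    have hfold : (x :: t).foldl max 0 = max 0 (t.foldl max x) := by
      simp only [List.foldl_cons]
      exact foldl_max_split t 0 x
    simp only [Option.getD_some]
    by_cases hpos : t.foldl max x > 0
    · rw [hfold, max_eq_right (le_of_lt hpos)]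
    · rw [hfold, max_eq_left (not_lt.mp hpos), if_neg (lt_irrefl 0), if_neg hpos]

-- ===== VERDICT (by name: the statement is the Claim_ definition above) =====
theorem get_argmax_spec : Claim_equal_get_argmax := by
  intro array _ _
  show get_argmax array = get_argmax_alt array
  unfold get_argmax get_argmax_alt
  have hrw : (PySem.List.pyRange 0 (array.length : Int) 1).foldl
      (fun (p : Int × Int) i =>
        if PySem.List.pyGetD array i 0 > p.1 then (PySem.List.pyGetD array i 0, i) else p)
      (0, 0)
    = (PySem.List.enumerate array 0).foldl
      (fun (p : Int × Int) e => if e.2 > p.1 then (e.2, e.1) else p) (0, 0) := by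
    rw [PySem.List.enumerate_eq_map_pyRange (d := 0), List.foldl_map]
    simp only [PySem.List.len_eq]
  rw [hrw, loop_spec array 0 0 0]
  simp only [zero_add]
  rw [index_agree array]
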